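-- pv_equiv track=rewrite | github.com/rangat/whAnalysis | helper.py | get_v_before_wh
-- ===== SOURCE A (Python) =====
-- def get_v_before_wh(tagged:list, wh:str) -> str:
--     hit_wh = False
--     t = tagged[::-1]
--     for word,pos in t:
--         if word.lower() == wh.lower():
--             hit_wh = True
--         elif ('V' in pos[0] or "MD" in pos) and hit_wh:
--             return word
--     return ""
-- ===== SOURCE B (Python) =====
-- def get_v_before_wh(tagged: list, wh: str) -> str:
--     # Forward single pass: `candidate` = most recent verb/modal seen,
--     # `answer` = candidate at the moment of the last wh-match.
--     candidate = ""
--     answer = ""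
--     wl = wh.lower()
--     for word, pos in tagged:
--         if word.lower() == wl:
--             answer = candidate
--         elif pos.startswith('V') or "MD" in pos:
--             candidate = word
--     return answer
-- ===== Notes on version B (the rewrite author's own statement) =====
-- stated objective: faster
-- what changed: Replaces A's reversed scan with early return by a single forward pass keeping two accumulators (last verb/modal seen, and its value at the last wh-match); no reversed copy of the list is built and wh.lower() is computed once instead of per token.
-- outside the precondition, e.g. on get_v_before_wh([('x', ''), ('run', 'VB'), ('who', 'WP')], 'who'): A returns 'run', B returns 'run'
import Mathlib
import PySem

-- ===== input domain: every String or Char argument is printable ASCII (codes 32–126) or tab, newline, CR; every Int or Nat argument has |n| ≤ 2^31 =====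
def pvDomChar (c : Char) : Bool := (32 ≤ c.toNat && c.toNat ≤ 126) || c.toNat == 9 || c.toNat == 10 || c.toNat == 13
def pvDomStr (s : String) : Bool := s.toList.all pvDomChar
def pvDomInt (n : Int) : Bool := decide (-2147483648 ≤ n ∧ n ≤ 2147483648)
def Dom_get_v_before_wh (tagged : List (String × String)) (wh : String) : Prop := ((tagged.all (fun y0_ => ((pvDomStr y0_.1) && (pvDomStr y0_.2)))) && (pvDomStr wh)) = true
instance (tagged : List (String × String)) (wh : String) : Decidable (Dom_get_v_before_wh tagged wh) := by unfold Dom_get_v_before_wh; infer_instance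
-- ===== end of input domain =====

-- B replaces A's reversed scan + early return by one forward pass with two accumulators; equal value on Pre_ (no speed claim).

-- ===== PORT A =====
-- 'V' in pos[0] or "MD" in pos; pos[0] raises IndexError on empty pos (none branch), excluded by Pre_
def pvAVerb (pos : String) : Bool :=
  (match PySem.Str.pyGet? pos 0 with
   | some c => PySem.Str.isIn "V" (String.ofList [c])
   | none => false) || PySem.Str.isIn "MD" pos

def pvALoop (wh : String) : List (String × String) → Bool → String
  | [], _ => ""
  | (word, pos) :: rest, hit_wh =>
    if PySem.Str.lower word == PySem.Str.lower wh then pvALoop wh rest true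
    else if pvAVerb pos && hit_wh then word
    else pvALoop wh rest hit_wh

def get_v_before_wh (tagged : List (String × String)) (wh : String) : String :=
  pvALoop wh ((PySem.List.slice? tagged none none (-1)).getD []) false

-- ===== PORT B =====
def pvBVerb (pos : String) : Bool :=
  PySem.Str.startswith pos "V" || PySem.Str.isIn "MD" pos

def get_v_before_wh_alt (tagged : List (String × String)) (wh : String) : String :=
  let wl := PySem.Str.lower wh
  (tagged.foldl
    (fun (st : String × String) (t : String × String) =>
      if PySem.Str.lower t.1 == wl then (st.1, st.1)
      else if pvBVerb t.2 then (t.1, st.2)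
      else st)
    ("", "")).2

-- ===== PRECONDITION & SPEC =====
-- A evaluates pos[0] on every token whose word does not match wh, so an empty pos there raises
-- IndexError; Pre_ excludes every such input (slightly wider than strictly needed: A can return
-- early, before reaching an empty-pos token further toward the front — see claim.json cites).
def Pre_get_v_before_wh (tagged : List (String × String)) (wh : String) : Prop :=
  ∀ p ∈ tagged, PySem.Str.lower p.1 ≠ PySem.Str.lower wh → p.2 ≠ ""
instance (tagged : List (String × String)) (wh : String) : Decidable (Pre_get_v_before_wh tagged wh) := by unfold Pre_get_v_before_wh; infer_instance

def pvWitness_get_v_before_wh : (List (String × String)) × String :=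
  ([("did", "VBD"), ("what", "WP"), ("he", "PRP")], "what")

def Spec_get_v_before_wh (tagged : List (String × String)) (wh : String) (out : String) : Prop := out = get_v_before_wh_alt tagged wh
instance (tagged : List (String × String)) (wh : String) (out : String) : Decidable (Spec_get_v_before_wh tagged wh out) := by unfold Spec_get_v_before_wh; infer_instance

-- ===== CLAIM (what is proved, stated in full; the proofs are below) =====
def Claim_equal_get_v_before_wh : Prop := ∀ (tagged : List (String × String)) (wh : String), Dom_get_v_before_wh tagged wh → Pre_get_v_before_wh tagged wh → Spec_get_v_before_wh tagged wh (get_v_before_wh tagged wh)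

-- ===== LEMMAS AND PROOFS =====

-- the B-side fold step
def pvBStep (wl : String) (st : String × String) (t : String × String) : String × String :=
  if PySem.Str.lower t.1 == wl then (st.1, st.1)
  else if pvBVerb t.2 then (t.1, st.2)
  else st

lemma pvVerb_eq (pos : String) (h : pos ≠ "") : pvAVerb pos = pvBVerb pos := by
  have hne : pos.toList ≠ [] := fun hnil => h (by
    have := congrArg String.ofList hnil
    simpa using this)
  obtain ⟨c, rest, hc⟩ := List.exists_cons_of_ne_nil hne
  unfold pvAVerb pvBVerb
  simp only [PySem.Str.pyGet?_eq, PySem.Chars.pyGet?_eq_listPyGet?, hc,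
    PySem.Str.isIn_eq, PySem.Str.startswith_eq, PySem.List.pyGet?_zero_cons]
  simp only [String.toList_ofList]
  congr 1
  by_cases hv : c = 'V'
  · subst hv
    rw [show PySem.Chars.isIn "V".toList ['V'] = true from
        (PySem.Chars.isIn_iff_infix _ _).2 (by simp),
      show PySem.Chars.startswith ('V' :: rest) "V".toList = true from
        (PySem.Chars.startswith_iff _ _).2 (by simp)]
  · have h1 : PySem.Chars.isIn "V".toList [c] = false := by
      rw [PySem.Chars.isIn_eq_false_iff]
      intro hinf
      have := List.IsInfix.eq_of_length hinf (by simp)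
      simp at this
      exact hv this.symm
    have h2 : PySem.Chars.startswith (c :: rest) "V".toList = false := by
      rw [Bool.eq_false_iff]
      intro hsw
      have := (PySem.Chars.startswith_iff _ _).1 hsw
      simp [List.cons_prefix_cons] at this
      exact hv this.symm
    rw [h1, h2]

lemma pvMain (wh : String) (l : List (String × String))
    (hPre : ∀ p ∈ l, PySem.Str.lower p.1 ≠ PySem.Str.lower wh → p.2 ≠ "") :
    pvALoop wh l.reverse true = (l.foldl (pvBStep (PySem.Str.lower wh)) ("", "")).1 ∧
    pvALoop wh l.reverse false = (l.foldl (pvBStep (PySem.Str.lower wh)) ("", "")).2 := by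
  induction l using List.reverseRecOn with
  | nil => simp [pvALoop]
  | append_singleton l x ih =>
    have hPreL : ∀ p ∈ l, PySem.Str.lower p.1 ≠ PySem.Str.lower wh → p.2 ≠ "" :=
      fun p hp => hPre p (List.mem_append_left _ hp)
    have hPreX : PySem.Str.lower x.1 ≠ PySem.Str.lower wh → x.2 ≠ "" :=
      hPre x (List.mem_append_right _ (List.mem_singleton_self x))
    obtain ⟨ih1, ih2⟩ := ih hPreL
    obtain ⟨w, p⟩ := x
    rw [List.reverse_append, List.reverse_singleton, List.singleton_append,
        List.foldl_append, List.foldl_cons, List.foldl_nil]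
    by_cases hw : PySem.Str.lower w = PySem.Str.lower wh
    · simp only [pvALoop, pvBStep, hw, beq_self_eq_true, if_true]
      exact ⟨ih1, ih1⟩
    · have hbeq : (PySem.Str.lower w == PySem.Str.lower wh) = false := beq_eq_false_iff_ne.2 hw
      have hp : p ≠ "" := hPreX hw
      have hvb := pvVerb_eq p hp
      simp only [pvALoop, pvBStep, hbeq, Bool.false_eq_true, if_false]
      cases hb : pvBVerb p with
      | true =>
        rw [hvb, hb]
        simp only [Bool.true_and, Bool.and_false, if_true, Bool.false_eq_true, if_false]
        exact ⟨trivial, ih2⟩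
      | false =>
        rw [hvb, hb]
        simp only [Bool.false_and, Bool.false_eq_true, if_false]
        exact ⟨ih1, ih2⟩

-- ===== VERDICT (by name: the statement is the Claim_ definition above) =====
theorem get_v_before_wh_spec : Claim_equal_get_v_before_wh := by
  intro tagged wh _ hPre
  unfold Spec_get_v_before_wh get_v_before_wh get_v_before_wh_alt
  rw [PySem.List.slice?_none_none_neg_one]
  exact (pvMain wh tagged hPre).2
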